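-- pv_equiv track=rewrite | github.com/maxipdev/Introduccion-a-la-programacion-1-UBA | Guia7.py | vocales_distintas
-- ===== SOURCE A (Python) =====
-- def vocales_distintas(palabra):
--     palabra = palabra.lower()
--     vocales = ["a", "e", "i", "o", "u"]
--     vocales_usadas = []
--     for i in palabra:
--         if i in vocales: # miro que sea una vocal
--             if not (i in vocales_usadas): #Miramos que la vocal no este adentro de las usadas
--                 vocales_usadas.append(i) #Si no esta en las vocales usadas la agregamos
--     if len(vocales_usadas) >= 3:
--         return True
--     else :
--         return False
-- ===== SOURCE B (Python) =====
-- def vocales_distintas(palabra):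
--     w = palabra.lower()
--     count = 0
--     for v in "aeiou":
--         if v in w:
--             count += 1
--     return count >= 3
-- ===== Notes on version B (the rewrite author's own statement) =====
-- stated objective: idiomatic
-- what changed: B iterates over the fixed five-vowel alphabet and counts which vowels occur in the lowered word, instead of scanning the word while maintaining a seen-vowels list.
import Mathlib
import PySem

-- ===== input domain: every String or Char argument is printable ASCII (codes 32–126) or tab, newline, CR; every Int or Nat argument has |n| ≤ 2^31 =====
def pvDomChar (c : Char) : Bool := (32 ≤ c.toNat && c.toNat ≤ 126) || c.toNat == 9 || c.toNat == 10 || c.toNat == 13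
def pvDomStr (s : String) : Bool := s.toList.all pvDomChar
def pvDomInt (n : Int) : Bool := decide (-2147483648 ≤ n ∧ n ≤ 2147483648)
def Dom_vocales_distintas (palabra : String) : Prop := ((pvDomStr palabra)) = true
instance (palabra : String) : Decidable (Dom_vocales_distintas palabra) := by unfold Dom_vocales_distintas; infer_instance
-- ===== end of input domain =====

-- B iterates the fixed vowel alphabet and counts vowels present in the lowered word,
-- instead of A's scan of the word maintaining a seen-vowels list (objective: idiomatic).

-- ===== PORT A =====
-- literal port: lower the word, scan its chars, append unseen vowels, compare length with 3
def vocales_distintas (palabra : String) : Bool :=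
  let vocales : List Char := ['a', 'e', 'i', 'o', 'u']
  let usadas := (PySem.Str.lower palabra).toList.foldl
    (fun acc i => if i ∈ vocales then (if ¬ (i ∈ acc) then acc ++ [i] else acc) else acc) []
  if usadas.length ≥ 3 then true else false

-- ===== PORT B =====
-- literal port of Source B: loop over "aeiou", count vowels v with v ∈ lowered word ('v in w'
-- for a single char v is char membership), return count ≥ 3
def vocales_distintas_alt (palabra : String) : Bool :=
  let w := (PySem.Str.lower palabra).toList
  let count := (['a', 'e', 'i', 'o', 'u'] : List Char).foldl
    (fun c v => if v ∈ w then c + 1 else c) (0 : Int)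
  count ≥ 3

-- ===== PRECONDITION & SPEC =====
def Spec_vocales_distintas (palabra : String) (out : Bool) : Prop := out = vocales_distintas_alt palabra
instance (palabra : String) (out : Bool) : Decidable (Spec_vocales_distintas palabra out) := by unfold Spec_vocales_distintas; infer_instance

-- ===== CLAIM (what is proved, stated in full; the proofs are below) =====
def Claim_equal_vocales_distintas : Prop := ∀ (palabra : String), Dom_vocales_distintas palabra → Spec_vocales_distintas palabra (vocales_distintas palabra)

-- ===== LEMMAS AND PROOFS =====

-- invariant of A's loop: the accumulator stays nodup and collects exactly the
-- vowels seen so far (plus what it started with)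
theorem pvFoldA_inv (vocales : List Char) :
    ∀ (l acc : List Char), acc.Nodup →
      (l.foldl (fun acc i => if i ∈ vocales then (if ¬ (i ∈ acc) then acc ++ [i] else acc) else acc) acc).Nodup ∧
      ∀ c, c ∈ l.foldl (fun acc i => if i ∈ vocales then (if ¬ (i ∈ acc) then acc ++ [i] else acc) else acc) acc ↔
        c ∈ acc ∨ (c ∈ vocales ∧ c ∈ l) := by
  intro l
  induction l with
  | nil => intro acc h; simpa using h
  | cons x xs ih =>
    intro acc h
    simp only [List.foldl_cons]
    by_cases hx : x ∈ vocales
    · by_cases hmem : x ∈ acc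
      · rw [if_pos hx, if_neg (by simpa using hmem)]
        obtain ⟨h1, h2⟩ := ih acc h
        refine ⟨h1, fun c => ?_⟩
        rw [h2 c]
        simp only [List.mem_cons]
        constructor
        · rintro (hc | ⟨hv, hl⟩)
          · exact Or.inl hc
          · exact Or.inr ⟨hv, Or.inr hl⟩
        · rintro (hc | ⟨hv, hc | hl⟩)
          · exact Or.inl hc
          · subst hc; exact Or.inl hmem
          · exact Or.inr ⟨hv, hl⟩
      · rw [if_pos hx, if_pos (by simpa using hmem)]
        have hnd : (acc ++ [x]).Nodup :=
          List.Nodup.append h (List.nodup_singleton x)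
            (by intro a ha hb; simp at hb; subst hb; exact hmem ha)
        obtain ⟨h1, h2⟩ := ih (acc ++ [x]) hnd
        refine ⟨h1, fun c => ?_⟩
        rw [h2 c]
        simp only [List.mem_append, List.mem_cons, List.not_mem_nil, or_false]
        constructor
        · rintro ((hc | hc) | ⟨hv, hl⟩)
          · exact Or.inl hc
          · subst hc; exact Or.inr ⟨hx, Or.inl rfl⟩
          · exact Or.inr ⟨hv, Or.inr hl⟩
        · rintro (hc | ⟨hv, hc | hl⟩)
          · exact Or.inl (Or.inl hc)
          · subst hc; exact Or.inl (Or.inr rfl)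
          · exact Or.inr ⟨hv, hl⟩
    · rw [if_neg hx]
      obtain ⟨h1, h2⟩ := ih acc h
      refine ⟨h1, fun c => ?_⟩
      rw [h2 c]
      simp only [List.mem_cons]
      constructor
      · rintro (hc | ⟨hv, hl⟩)
        · exact Or.inl hc
        · exact Or.inr ⟨hv, Or.inr hl⟩
      · rintro (hc | ⟨hv, hc | hl⟩)
        · exact Or.inl hc
        · subst hc; exact absurd hv hx
        · exact Or.inr ⟨hv, hl⟩

-- B's counting loop is the length of the filtered vowel list
theorem pvFoldB_count (w : List Char) :
    ∀ (vs : List Char) (c : Int),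
      vs.foldl (fun c v => if v ∈ w then c + 1 else c) c = c + (vs.filter (fun v => decide (v ∈ w))).length := by
  intro vs
  induction vs with
  | nil => intro c; simp
  | cons v vs ih =>
    intro c
    by_cases hv : v ∈ w
    · simp [hv, ih, add_assoc, add_comm]
    · simp [hv, ih]

theorem vocales_distintas_spec : Claim_equal_vocales_distintas := by
  intro palabra _
  unfold Spec_vocales_distintas vocales_distintas vocales_distintas_alt
  simp only []
  set vocales : List Char := ['a', 'e', 'i', 'o', 'u'] with hvoc
  set w := (PySem.Str.lower palabra).toList with hw
  have hinv := pvFoldA_inv vocales w [] (List.nodup_nil)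
  set usadas := w.foldl (fun acc i => if i ∈ vocales then (if ¬ (i ∈ acc) then acc ++ [i] else acc) else acc) [] with hus
  have hperm : usadas.Perm (vocales.filter (fun v => decide (v ∈ w))) := by
    refine (List.perm_ext_iff_of_nodup hinv.1 (List.Nodup.filter _ (by decide))).2 ?_
    intro c
    rw [hinv.2 c]
    simp [List.mem_filter]
  have hlen : usadas.length = (vocales.filter (fun v => decide (v ∈ w))).length := hperm.length_eq
  rw [pvFoldB_count w vocales 0, ← hlen]
  simp only [zero_add]
  by_cases h3 : usadas.length ≥ 3
  all_goals simp only [h3, if_pos, ge_iff_le]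
  all_goals rw [eq_comm, show ∀ b : Bool, ∀ p : Prop, ∀ _ : Decidable p, (decide p = b ↔ (b = true ↔ p)) from by
      intro b p _; cases b <;> simp]
  all_goals simp; omega
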